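-- pv_equiv track=rewrite | github.com/vaibhav-jha/document_qa | myGPT/mygpt_utils.py | _table_candidates_
-- ===== SOURCE A (Python) =====
-- def _table_candidates_(row_mask):
--     candidates = []
--     first, last = 0, 1
--     first_flag = True
--     for i, row in enumerate(row_mask):
--         if not row:
--             first_flag = True
--             if (last - first) > 3:
--                 candidates.append((first, last))
--             first = i
--             last = i + 1
--
--         else:
--             if first_flag:
--                 first = i
--                 first_flag = False
--             last = i + 1
--
--     return candidates
-- ===== SOURCE B (Python) =====
-- def _table_candidates_(row_mask):
--     # Gap-scan: collect the indices of falsy rows; each maximal truthy run that is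
--     # closed by a falsy row spans [start, j) for consecutive falsy indices; emit it
--     # when longer than 3.  A trailing truthy run has no closing falsy row and is
--     # therefore never emitted.
--     falsy = [i for i, row in enumerate(row_mask) if not row]
--     out = []
--     start = 0
--     for j in falsy:
--         if j - start > 3:
--             out.append((start, j))
--         start = j + 1
--     return out
-- ===== Notes on version B (the rewrite author's own statement) =====
-- stated objective: simpler
-- what changed: Replaces the flag/first/last state machine with a gap scan: collect the falsy indices once, then emit the gap between consecutive falsy indices when it exceeds 3 (the trailing run, never closed by a falsy row, is naturally dropped).
import Mathlib
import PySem

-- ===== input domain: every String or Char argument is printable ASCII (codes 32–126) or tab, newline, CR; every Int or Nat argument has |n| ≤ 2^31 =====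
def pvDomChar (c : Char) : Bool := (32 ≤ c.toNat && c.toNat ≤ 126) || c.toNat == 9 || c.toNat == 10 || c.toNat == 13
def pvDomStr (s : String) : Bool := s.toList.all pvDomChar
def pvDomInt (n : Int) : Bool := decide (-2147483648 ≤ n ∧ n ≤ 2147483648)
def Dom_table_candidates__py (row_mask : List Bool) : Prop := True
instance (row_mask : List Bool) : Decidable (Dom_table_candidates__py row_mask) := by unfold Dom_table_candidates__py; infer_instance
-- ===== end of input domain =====

-- B replaces A's flag/first/last state machine by a gap scan over the falsy indices (simpler; same cost).


-- ===== PORT A =====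
-- loop bodies factored out as named step functions (same code, named)
def pvAStep (st : List (Int × Int) × Int × Int × Bool) (p : Int × Bool) : List (Int × Int) × Int × Int × Bool :=
  let (candidates, first, last, first_flag) := st
  let i := p.1
  if !p.2 then
    ((if last - first > 3 then candidates ++ [(first, last)] else candidates), i, i + 1, true)
  else
    (candidates, (if first_flag then i else first), i + 1, false)

def pvBStep (st : List (Int × Int) × Int) (j : Int) : List (Int × Int) × Int :=
  ((if j - st.2 > 3 then st.1 ++ [(st.2, j)] else st.1), j + 1)

-- state = (candidates, first, last, first_flag)
def table_candidates__py (row_mask : List Bool) : List (Int × Int) :=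
  let s := (PySem.List.enumerate row_mask).foldl pvAStep ([], 0, 1, true)
  s.1

-- ===== PORT B =====
-- state = (out, start)
def table_candidates__py_alt (row_mask : List Bool) : List (Int × Int) :=
  let falsy : List Int := ((PySem.List.enumerate row_mask).filter (fun p => !p.2)).map (·.1)
  let s := falsy.foldl pvBStep ([], 0)
  s.1

-- ===== PRECONDITION & SPEC =====
def Spec_table_candidates__py (row_mask : List Bool) (out : List (Int × Int)) : Prop := out = table_candidates__py_alt row_mask
instance (row_mask : List Bool) (out : List (Int × Int)) : Decidable (Spec_table_candidates__py row_mask out) := by unfold Spec_table_candidates__py; infer_instance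

-- ===== CLAIM (what is proved, stated in full; the proofs are below) =====
def Claim_equal_table_candidates__py : Prop := ∀ (row_mask : List Bool), Dom_table_candidates__py row_mask → Spec_table_candidates__py row_mask (table_candidates__py row_mask)

-- ===== LEMMAS AND PROOFS =====

-- the loop invariant relating A's state to B's state when the next index to process is n
def pvInv (n : Int) (st : List (Int × Int) × Int × Int × Bool) (bs : List (Int × Int) × Int) : Prop :=
  st.1 = bs.1 ∧
  ((st.2.2.2 = true ∧ bs.2 = n ∧ st.2.2.1 - st.2.1 ≤ 1) ∨
   (st.2.2.2 = false ∧ st.2.1 = bs.2 ∧ st.2.2.1 = n))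

theorem pvLoop (l : List Bool) (n : Int) (st : List (Int × Int) × Int × Int × Bool)
    (bs : List (Int × Int) × Int) (h : pvInv n st bs) :
    ((PySem.List.enumerate l n).foldl pvAStep st).1 =
      ((((PySem.List.enumerate l n).filter (fun p => !p.2)).map (·.1)).foldl pvBStep bs).1 := by
  induction l generalizing n st bs with
  | nil => simpa [PySem.List.enumerate_nil] using h.1
  | cons b t ih =>
    rw [PySem.List.enumerate_cons]
    obtain ⟨cands, first, last, flag⟩ := st
    obtain ⟨out, start⟩ := bs
    obtain ⟨h1, h2⟩ := h
    simp only at h1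
    cases b with
    | false =>
      simp only [List.filter_cons, List.foldl_cons, List.map_cons]
      refine ih (n + 1) _ _ ?_
      constructor
      · -- output components equal after the step
        show (if last - first > 3 then cands ++ [(first, last)] else cands)
            = (if n - start > 3 then out ++ [(start, n)] else out)
        rcases h2 with ⟨_, hb, hle⟩ | ⟨_, hf, hl⟩
        · simp only at hb hle
          rw [if_neg (by omega), if_neg (by omega), h1]
        · simp only at hf hl
          subst hf hl h1
          rfl
      · exact Or.inl ⟨rfl, by simp [pvBStep], by simp [pvAStep]⟩
    | true =>
      simp only [List.filter_cons, List.foldl_cons, List.map_cons]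
      refine ih (n + 1) _ _ ?_
      rcases h2 with ⟨hfl, hb, _⟩ | ⟨hfl, hf, hl⟩
      · simp only at hfl hb; subst hfl hb
        exact ⟨h1, Or.inr ⟨rfl, by simp [pvAStep], by simp [pvAStep]⟩⟩
      · simp only at hfl hf hl; subst hfl hf hl
        exact ⟨h1, Or.inr ⟨rfl, by simp [pvAStep], by simp [pvAStep]⟩⟩

-- ===== VERDICT (by name: the statement is the Claim_ definition above) =====
theorem table_candidates__py_spec : Claim_equal_table_candidates__py := by
  intro row_mask _
  show table_candidates__py row_mask = table_candidates__py_alt row_mask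
  have := pvLoop row_mask 0 ([], 0, 1, true) ([], 0)
    ⟨rfl, Or.inl ⟨rfl, rfl, by norm_num⟩⟩
  exact this
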